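-- pv_equiv track=rewrite | github.com/molweave532/IntroToProg-Python-Mod06 | Assigment06_MW.py | remove_data_from_list
-- ===== SOURCE A (Python) =====
-- def remove_data_from_list(task, list_of_rows):
--     """ Removes a task from the list
--
--     :param task: (string) task to remove
--     :param list_of_rows: (list) of tasks
--     :return: updated list_of_rows, (string) if successful
--     """
--     search_result = ""
--     for i in range(0, len(list_of_rows)):
--         test = list_of_rows[i]
--         for myKey, myValue in test.items():
--             if myValue == task:  # Look for task in the to do list
--                 search_result = "Success"
--                 j = i
--                 break
--     if search_result == "Success":
--         del list_of_rows[j]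
--         return list_of_rows, search_result
--     else:
--         search_result = "That task isn't in the list!"
--         return list_of_rows, search_result
-- ===== SOURCE B (Python) =====
-- def remove_data_from_list(task, list_of_rows):
--     """ Removes the last row whose values contain task, scanning backwards
--     with an early exit instead of A's full forward scan. """
--     for i in range(len(list_of_rows) - 1, -1, -1):
--         if task in list_of_rows[i].values():
--             del list_of_rows[i]
--             return list_of_rows, "Success"
--     return list_of_rows, "That task isn't in the list!"
-- ===== Notes on version B (the rewrite author's own statement) =====
-- stated objective: idiomatic
-- what changed: A scans every row forward, remembering the index of the last matching row and deleting it afterwards; B walks the rows backwards and stops at the first match from the end, deleting and returning immediately.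
import Mathlib
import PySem

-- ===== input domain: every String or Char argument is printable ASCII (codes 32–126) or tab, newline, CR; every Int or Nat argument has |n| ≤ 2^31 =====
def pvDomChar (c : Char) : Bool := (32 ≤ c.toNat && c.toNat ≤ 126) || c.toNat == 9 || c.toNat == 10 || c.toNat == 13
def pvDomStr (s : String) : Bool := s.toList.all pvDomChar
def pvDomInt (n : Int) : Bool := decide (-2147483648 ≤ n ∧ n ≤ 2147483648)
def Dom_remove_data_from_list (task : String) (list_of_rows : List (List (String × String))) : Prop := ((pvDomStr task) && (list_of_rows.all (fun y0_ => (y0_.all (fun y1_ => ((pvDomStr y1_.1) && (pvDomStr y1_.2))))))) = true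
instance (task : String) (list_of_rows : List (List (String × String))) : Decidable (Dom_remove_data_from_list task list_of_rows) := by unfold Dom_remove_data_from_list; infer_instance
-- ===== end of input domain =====

-- B replaces A's full forward scan (remembering the last matching index) with a backward
-- early-exit scan; equivalence is about the RETURN value (both Pythons also mutate the list in place).


-- ===== PORT A =====
-- inner 'for myKey, myValue in test.items(): if myValue == task: …; break'
def pvInnerA (task : String) : List (String × String) → String × Int → Int → String × Int
  | [], st, _ => st
  | (_, v) :: rest, st, i => if v == task then ("Success", i) else pvInnerA task rest st i

def remove_data_from_list (task : String) (list_of_rows : List (List (String × String))) : (List (List (String × String))) × String :=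
  -- for i in range(0, len): test = rows[i]; inner loop sets (search_result, j)
  let st := (PySem.List.enumerate list_of_rows).foldl
    (fun (st : String × Int) (p : Int × List (String × String)) => pvInnerA task p.2 st p.1) ("", 0)
  if st.1 == "Success" then (list_of_rows.eraseIdx st.2.toNat, st.1)
  else (list_of_rows, "That task isn't in the list!")

-- ===== PORT B =====
-- backward scan 'for i in range(len-1, -1, -1)': structurally, try the tail (later rows) first;
-- only if no later row matched, test the head row.
def pvRemLast (task : String) : List (List (String × String)) → Option (List (List (String × String)))
  | [] => none
  | r :: rs =>
    match pvRemLast task rs with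
    | some rs' => some (r :: rs')
    | none => if r.any (fun p => p.2 == task) then some rs else none

def remove_data_from_list_alt (task : String) (list_of_rows : List (List (String × String))) : (List (List (String × String))) × String :=
  match pvRemLast task list_of_rows with
  | some l => (l, "Success")
  | none => (list_of_rows, "That task isn't in the list!")

-- ===== PRECONDITION & SPEC =====
def Spec_remove_data_from_list (task : String) (list_of_rows : List (List (String × String))) (out : (List (List (String × String))) × String) : Prop := out = remove_data_from_list_alt task list_of_rows
instance (task : String) (list_of_rows : List (List (String × String))) (out : (List (List (String × String))) × String) : Decidable (Spec_remove_data_from_list task list_of_rows out) := by unfold Spec_remove_data_from_list; infer_instance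

-- ===== CLAIM (what is proved, stated in full; the proofs are below) =====
def Claim_equal_remove_data_from_list : Prop := ∀ (task : String) (list_of_rows : List (List (String × String))), Dom_remove_data_from_list task list_of_rows → Spec_remove_data_from_list task list_of_rows (remove_data_from_list task list_of_rows)

-- ===== LEMMAS AND PROOFS =====

-- index of the LAST matching row, mirroring neither port's control flow
def pvLastIdx (task : String) : List (List (String × String)) → Option Nat
  | [] => none
  | r :: rs =>
    match pvLastIdx task rs with
    | some k => some (k + 1)
    | none => if r.any (fun p => p.2 == task) then some 0 else none

theorem pvInnerA_eq (task : String) (row : List (String × String)) (st : String × Int) (i : Int) :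
    pvInnerA task row st i = if row.any (fun p => p.2 == task) then ("Success", i) else st := by
  induction row with
  | nil => simp [pvInnerA]
  | cons h t ih =>
    obtain ⟨k, v⟩ := h
    simp only [pvInnerA, List.any_cons]
    by_cases hv : (v == task) = true
    · simp [hv]
    · simp only [Bool.or_eq_true, hv, Bool.false_eq_true, false_or, if_false, ih]

theorem foldA_eq (task : String) (rows : List (List (String × String))) (n : Int) (st : String × Int) :
    (PySem.List.enumerate rows n).foldl
      (fun (st : String × Int) (p : Int × List (String × String)) => pvInnerA task p.2 st p.1) st
    = match pvLastIdx task rows with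
      | some k => ("Success", n + k)
      | none => st := by
  induction rows generalizing n st with
  | nil => simp [PySem.List.enumerate_nil, pvLastIdx]
  | cons r rs ih =>
    rw [PySem.List.enumerate_cons]
    simp only [List.foldl_cons, ih]
    rw [pvInnerA_eq]
    cases hrs : pvLastIdx task rs with
    | some k =>
      simp only [pvLastIdx, hrs, Prod.mk.injEq, true_and]
      push_cast; ring
    | none =>
      simp only [pvLastIdx, hrs]
      by_cases hr : (r.any fun p => p.2 == task) = true <;> simp [hr]

theorem pvRemLast_eq (task : String) (rows : List (List (String × String))) :
    pvRemLast task rows = (pvLastIdx task rows).map (fun k => rows.eraseIdx k) := by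
  induction rows with
  | nil => simp [pvRemLast, pvLastIdx]
  | cons r rs ih =>
    cases hrs : pvLastIdx task rs with
    | some k =>
      simp [pvRemLast, pvLastIdx, ih, hrs, List.eraseIdx_cons_succ]
    | none =>
      simp only [pvRemLast, pvLastIdx, ih, hrs, Option.map_none]
      split <;> simp

-- ===== VERDICT (by name: the statement is the Claim_ definition above) =====
theorem remove_data_from_list_spec : Claim_equal_remove_data_from_list := by
  intro task rows _
  unfold Spec_remove_data_from_list remove_data_from_list remove_data_from_list_alt
  rw [pvRemLast_eq]
  have h := foldA_eq task rows 0 ("", 0)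
  rw [h]
  cases hk : pvLastIdx task rows with
  | none => simp
  | some k => simp
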